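-- pv_equiv track=rewrite | github.com/m3xw3ll/LeetCode | Algorithms/snippets/890_find_and_replace_pattern.py | make_pattern
-- ===== SOURCE A (Python) =====
-- def make_pattern(word):
--     dic = {}
--     p = list()
--     cnt = 0
--
--     for char in word:
--         if char not in dic:
--             dic[char] = cnt
--             cnt += 1
--         p.append(dic[char])
--     return p
-- ===== SOURCE B (Python) =====
-- def make_pattern(word):
--     # Recursive "peel one symbol" algorithm: the first character gets rank 0,
--     # the remaining distinct characters are ranked by recursing on the word
--     # with all copies of that character removed, shifting ranks by one.
--     if not word:
--         return []
--     c = word[0]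
--     sub = make_pattern([x for x in word if x != c])
--     out = []
--     j = 0
--     for x in word:
--         if x == c:
--             out.append(0)
--         else:
--             out.append(sub[j] + 1)
--             j += 1
--     return out
-- ===== Notes on version B (the rewrite author's own statement) =====
-- stated objective: alternative
-- what changed: Replaces A's single dict-building pass with a recursive peel-one-symbol algorithm: the first character gets rank 0, the word with that character removed is solved recursively, and the shifted sub-ranks are merged back in one pass; no dictionary at all.
import Mathlib
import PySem

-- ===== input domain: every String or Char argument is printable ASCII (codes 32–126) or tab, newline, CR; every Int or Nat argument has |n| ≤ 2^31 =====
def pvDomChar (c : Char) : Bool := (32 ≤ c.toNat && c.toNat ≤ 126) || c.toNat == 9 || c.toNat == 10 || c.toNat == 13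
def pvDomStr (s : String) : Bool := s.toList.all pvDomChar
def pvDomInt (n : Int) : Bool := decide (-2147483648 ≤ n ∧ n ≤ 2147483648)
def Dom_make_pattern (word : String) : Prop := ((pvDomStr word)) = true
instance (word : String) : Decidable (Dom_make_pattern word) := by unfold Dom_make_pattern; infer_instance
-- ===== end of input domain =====

-- B replaces A's dict-building pass with a recursive peel-one-symbol algorithm (no dictionary);
-- same behaviour, a genuinely different algorithm of similar cost.

-- ===== PORT A =====
-- one loop iteration of A: maybe insert the fresh char with the counter, then append dic[char]
def aStep (st : PySem.Dict Char Int × Int × List Int) (char : Char) :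
    PySem.Dict Char Int × Int × List Int :=
  let dic := st.1
  let cnt := st.2.1
  let p := st.2.2
  let dic' := if dic.contains char then dic else dic.insert char cnt
  let cnt' := if dic.contains char then cnt else cnt + 1
  -- p.append(dic[char]); char is always a key here, so getD is exact
  (dic', cnt', p ++ [dic'.getD char 0])

def make_pattern (word : String) : List Int :=
  (word.toList.foldl aStep (PySem.Dict.empty, 0, [])).2.2

-- ===== PORT B =====
-- the merge loop of Source B: walk the word, emit 0 for c, else consume the next sub-rank + 1
-- (sub always holds exactly one value per non-c character, so the [] fallback is unreachable;
--  in Python an exhausted sub[j] would raise IndexError, which never happens)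
def bMerge (c : Char) : List Char → List Int → List Int
  | [], _ => []
  | x :: xs, sub =>
    if x = c then 0 :: bMerge c xs sub
    else match sub with
      | s :: ss => (s + 1) :: bMerge c xs ss
      | [] => []

-- the recursion of Source B over the character list
def bPat : List Char → List Int
  | [] => []
  | c :: t =>
    let sub := bPat ((c :: t).filter (fun x => x ≠ c))
    bMerge c (c :: t) sub
termination_by l => l.length
decreasing_by
  simp only [List.filter_cons, decide_not]
  rw [if_neg (by simp)]
  exact Nat.lt_succ_of_le (List.length_filter_le _ _)

def make_pattern_alt (word : String) : List Int := bPat word.toList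

-- ===== PRECONDITION & SPEC =====
def Spec_make_pattern (word : String) (out : List Int) : Prop := out = make_pattern_alt word
instance (word : String) (out : List Int) : Decidable (Spec_make_pattern word out) := by unfold Spec_make_pattern; infer_instance

-- ===== CLAIM (what is proved, stated in full; the proofs are below) =====
def Claim_equal_make_pattern : Prop := ∀ (word : String), Dom_make_pattern word → Spec_make_pattern word (make_pattern word)

-- ===== LEMMAS AND PROOFS =====

-- the canonical value both programs compute at each character
def canonAt (u : List Char) (c : Char) : Int :=
  (PySem.List.index? u c).elim 0 (fun k => (k : Int))

theorem index?_isSome_of_mem (u : List Char) (c : Char) (hc : c ∈ u) :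
    ∃ k, PySem.List.index? u c = some k := by
  induction u with
  | nil => cases hc
  | cons x xs ih =>
    by_cases hx : x = c
    · subst hx; exact ⟨0, by simp [PySem.List.index?_eq_idxOf?, List.idxOf?_cons]⟩
    · obtain ⟨k, hk⟩ := ih (by
        rcases List.mem_cons.mp hc with h | h
        · exact absurd h.symm hx
        · exact h)
      exact ⟨k + 1, by rw [PySem.List.index?_cons_of_ne xs hx, hk]; rfl⟩

-- ---- A-side: the rank dict A builds, characterised through rankOf ----
def rankOf (order : List Char) : PySem.Dict Char Int :=
  (PySem.List.enumerate order 0).foldl (fun d p => d.insert p.2 p.1) PySem.Dict.empty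

theorem rankOf_keys (u : List Char) : (rankOf u).keys = PySem.Set.ofList u := by
  unfold rankOf
  rw [PySem.Dict.keys_foldl_insert_key]
  simp [PySem.List.map_snd_enumerate, PySem.Set.update_nil_left]

theorem rankOf_contains (u : List Char) (c : Char) :
    (rankOf u).contains c = decide (c ∈ u) := by
  rw [PySem.Dict.contains_eq_decide_mem_keys, rankOf_keys]
  simp [PySem.Set.mem_ofList]

theorem rankOf_append_singleton (u : List Char) (c : Char) :
    rankOf (u ++ [c]) = (rankOf u).insert c (u.length : Int) := by
  unfold rankOf
  rw [PySem.List.enumerate_append, List.foldl_append]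
  simp

theorem rankOf_getD (u : List Char) (hu : u.Nodup) (k : Nat) (hk : k < u.length) :
    (rankOf u).getD u[k] 0 = (k : Int) := by
  have hnd : (rankOf u).keys.Nodup := by
    rw [rankOf_keys]; exact PySem.Set.nodup_ofList u
  have hmem : ((u[k], (k : Int))) ∈ (rankOf u).items := by
    unfold rankOf
    rw [PySem.Dict.items_foldl_insert_fresh]
    · rw [show (PySem.Dict.empty : PySem.Dict Char Int).items = [] from rfl, List.nil_append,
          List.mem_map]
      exact ⟨((k : Int), u[k]), by
        rw [PySem.List.mem_enumerate_iff]; exact ⟨k, hk, by simp⟩, rfl⟩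
    · intro a _; simp [PySem.Dict.contains_empty]
    · rw [PySem.List.map_snd_enumerate]; exact hu
  exact PySem.Dict.getD_of_mem_items (rankOf u) hmem hnd 0

theorem rankOf_getD_index? (u : List Char) (hu : u.Nodup) (c : Char) (k : Nat)
    (h : PySem.List.index? u c = some k) :
    (rankOf u).getD c 0 = (k : Int) := by
  obtain ⟨hk, hck, -⟩ := PySem.List.getElem_of_index?_eq_some h
  rw [← hck]; exact rankOf_getD u hu k hk

-- the main loop invariant for A: starting from the rank dict of the distinct chars seen so far
theorem loopA (rest : List Char) : ∀ (u : List Char), u.Nodup → ∀ (p : List Int),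
    (rest.foldl aStep (rankOf u, (u.length : Int), p)).2.2
      = p ++ rest.map (fun c => canonAt (PySem.Set.update u rest) c) := by
  induction rest with
  | nil => intro u _ p; simp [PySem.Set.update_nil]
  | cons c rest' ih =>
    intro u hu p
    rw [List.foldl_cons]
    by_cases hc : c ∈ u
    · have hcontains : (rankOf u).contains c = true := by
        rw [rankOf_contains]; simpa using hc
      have hstep : aStep (rankOf u, (u.length : Int), p) c
          = (rankOf u, (u.length : Int), p ++ [(rankOf u).getD c 0]) := by
        simp [aStep, hcontains]
      rw [hstep, ih u hu (p ++ [(rankOf u).getD c 0])]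
      have hupd : PySem.Set.update u (c :: rest') = PySem.Set.update u rest' := by
        rw [PySem.Set.update_cons, PySem.Set.add_of_mem hc]
      obtain ⟨k, hk⟩ := index?_isSome_of_mem u c hc
      have hkfull : PySem.List.index? (PySem.Set.update u rest') c = some k := by
        rw [PySem.Set.update_eq_append_filter, PySem.List.index?_append_of_mem _ hc]
        exact hk
      rw [hupd, List.map_cons, rankOf_getD_index? u hu c k hk]
      simp only [canonAt]
      rw [hkfull]
      simp
    · have hcontains : (rankOf u).contains c = false := by
        rw [rankOf_contains]; simpa using hc
      have hnd' : (u ++ [c]).Nodup := by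
        refine List.Nodup.append hu (List.nodup_singleton c) ?_
        simpa using hc
      have hdic' : (rankOf u).insert c (u.length : Int) = rankOf (u ++ [c]) :=
        (rankOf_append_singleton u c).symm
      have hstep : aStep (rankOf u, (u.length : Int), p) c
          = (rankOf (u ++ [c]), ((u ++ [c]).length : Int),
             p ++ [(rankOf (u ++ [c])).getD c 0]) := by
        simp [aStep, hcontains, hdic']
      rw [hstep, ih (u ++ [c]) hnd' _]
      have hupd : PySem.Set.update u (c :: rest') = PySem.Set.update (u ++ [c]) rest' := by
        rw [PySem.Set.update_cons, PySem.Set.add_of_not_mem hc]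
      have hk : PySem.List.index? (u ++ [c]) c = some u.length :=
        PySem.List.index?_append_singleton_self u c hc
      have hkfull : PySem.List.index? (PySem.Set.update (u ++ [c]) rest') c
          = some u.length := by
        rw [PySem.Set.update_eq_append_filter,
            PySem.List.index?_append_of_mem _ (by simp : c ∈ u ++ [c])]
        exact hk
      rw [hupd, List.map_cons,
          rankOf_getD_index? (u ++ [c]) hnd' c u.length hk]
      simp only [canonAt]
      rw [hkfull]
      simp

theorem make_pattern_eq (word : String) :
    make_pattern word = word.toList.map (fun c => canonAt (PySem.Set.ofList word.toList) c) := by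
  unfold make_pattern
  have h0 : (PySem.Dict.empty, (0 : Int), ([] : List Int))
      = (rankOf [], (([] : List Char).length : Int), ([] : List Int)) := by
    simp [rankOf]
  rw [h0, loopA word.toList [] List.nodup_nil []]
  simp [PySem.Set.update_nil_left]

-- ---- B-side ----

-- filter through a cons, with the test resolved
theorem filterNe_cons (c x : Char) (t : List Char) :
    (x :: t).filter (fun y => y ≠ c)
      = if x = c then t.filter (fun y => y ≠ c) else x :: t.filter (fun y => y ≠ c) := by
  by_cases hx : x = c <;> simp [hx]

-- the merge loop, fed exactly the sub-ranks of the non-c characters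
theorem bMerge_map (c : Char) (f : Char → Int) (l : List Char) :
    bMerge c l ((l.filter (fun x => x ≠ c)).map f)
      = l.map (fun x => if x = c then 0 else f x + 1) := by
  induction l with
  | nil => rfl
  | cons x xs ih =>
    rw [filterNe_cons]
    by_cases hx : x = c
    · subst hx; rw [if_pos rfl]; simpa [bMerge] using ih
    · rw [if_neg hx]; simpa [bMerge, hx] using ih

-- updating past a distinguished head: elements ≠ c behave the same
theorem update_cons_notmem (c : Char) (l : List Char) (hl : c ∉ l) :
    ∀ s : List Char, PySem.Set.update (c :: s) l = c :: PySem.Set.update s l := by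
  induction l with
  | nil => intro s; simp [PySem.Set.update_nil]
  | cons z zs ih =>
    intro s
    have hz : z ≠ c := fun h => hl (by simp [h])
    have hzs : c ∉ zs := fun h => hl (by simp [h])
    by_cases hmem : z ∈ s
    · rw [PySem.Set.update_cons, PySem.Set.add_of_mem (by simp [hmem]),
          PySem.Set.update_cons, PySem.Set.add_of_mem hmem]
      exact ih hzs s
    · have h1 : PySem.Set.add (c :: s) z = c :: (s ++ [z]) := by
        simp [PySem.Set.add, PySem.Set.contains, hmem]
        exact hz
      have h2 : PySem.Set.add s z = s ++ [z] := by
        simp [PySem.Set.add, PySem.Set.contains, hmem]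
      rw [PySem.Set.update_cons, h1, PySem.Set.update_cons, h2]
      exact ih hzs (s ++ [z])

-- elements equal to a member of s are no-ops in an update
theorem update_filter_mem (c : Char) (zs : List Char) :
    ∀ s : List Char, c ∈ s →
      PySem.Set.update s zs = PySem.Set.update s (zs.filter (fun x => x ≠ c)) := by
  induction zs with
  | nil => intro s _; rfl
  | cons z zs' ih =>
    intro s hs
    rw [filterNe_cons]
    by_cases hz : z = c
    · subst hz
      rw [if_pos rfl, PySem.Set.update_cons, PySem.Set.add_of_mem hs]
      exact ih s hs
    · rw [if_neg hz, PySem.Set.update_cons, PySem.Set.update_cons]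
      exact ih (PySem.Set.add s z) (by
        by_cases hmem : z ∈ s
        · rwa [PySem.Set.add_of_mem hmem]
        · rw [PySem.Set.add_of_not_mem hmem]; simp [hs])

-- set(first-occurrence dedup) of c :: t = c followed by the dedup of the non-c part
theorem ofList_cons_filter (c : Char) (t : List Char) :
    PySem.Set.ofList (c :: t) = c :: PySem.Set.ofList (t.filter (fun x => x ≠ c)) := by
  have h0 : PySem.Set.ofList (c :: t) = PySem.Set.update [c] t := by
    simp [PySem.Set.ofList_eq_foldl, PySem.Set.update, PySem.Set.add,
      PySem.Set.contains]
  have h3 : PySem.Set.ofList (t.filter (fun x => x ≠ c))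
      = PySem.Set.update [] (t.filter (fun x => x ≠ c)) := by
    simp [PySem.Set.ofList_eq_foldl, PySem.Set.update]
  rw [h0, update_filter_mem c t [c] (by simp), h3,
      update_cons_notmem c _ (by simp [List.mem_filter]) []]

-- canonical value at a character, unfolded one distinct symbol
theorem canonAt_cons (c : Char) (t : List Char) (x : Char) (hmem : x ∈ c :: t) :
    canonAt (PySem.Set.ofList (c :: t)) x
      = if x = c then 0
        else canonAt (PySem.Set.ofList (t.filter (fun y => y ≠ c))) x + 1 := by
  rw [ofList_cons_filter]
  by_cases hx : x = c
  · subst hx; simp [canonAt, PySem.List.index?_eq_idxOf?, List.idxOf?_cons]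
  · rw [if_neg hx]
    rw [show canonAt (c :: PySem.Set.ofList (t.filter (fun y => y ≠ c))) x
        = (PySem.List.index? (c :: PySem.Set.ofList (t.filter (fun y => y ≠ c))) x).elim 0
            (fun k => (k : Int)) from rfl,
      PySem.List.index?_cons_of_ne _ (fun h => hx h.symm)]
    cases h : PySem.List.index? (PySem.Set.ofList (t.filter (fun y => y ≠ c))) x with
    | none =>
      -- impossible: x ∈ t and x ≠ c, so x is in the filtered dedup
      exfalso
      have hxt : x ∈ t := by
        rcases List.mem_cons.mp hmem with h' | h'
        · exact absurd h' hx
        · exact h'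
      have : x ∈ PySem.Set.ofList (t.filter (fun y => y ≠ c)) := by
        rw [PySem.Set.mem_ofList, List.mem_filter]
        exact ⟨hxt, by simpa using hx⟩
      obtain ⟨k, hk⟩ := index?_isSome_of_mem _ x this
      rw [h] at hk; cases hk
    | some k =>
      simp only [canonAt, h, Option.map_some, Option.elim_some]
      push_cast; ring

-- B computes the canonical pattern
theorem bPat_eq (l : List Char) :
    bPat l = l.map (fun x => canonAt (PySem.Set.ofList l) x) := by
  induction l using bPat.induct with
  | case1 => simp [bPat]
  | case2 c t ih =>
    rw [bPat]
    have hfilter : (c :: t).filter (fun x => x ≠ c) = t.filter (fun x => x ≠ c) := by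
      rw [filterNe_cons, if_pos rfl]
    rw [hfilter] at ih
    rw [hfilter, ih, ← hfilter,
        bMerge_map c
          (fun x => canonAt (PySem.Set.ofList ((c :: t).filter (fun y => y ≠ c))) x) (c :: t),
        hfilter]
    apply List.map_congr_left
    intro x hxmem
    exact (canonAt_cons c t x hxmem).symm

theorem make_pattern_alt_eq (word : String) :
    make_pattern_alt word
      = word.toList.map (fun c => canonAt (PySem.Set.ofList word.toList) c) := by
  unfold make_pattern_alt
  exact bPat_eq word.toList

-- ===== VERDICT (by name: the statement is the Claim_ definition above) =====
theorem make_pattern_spec : Claim_equal_make_pattern := by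
  intro word _
  unfold Spec_make_pattern
  rw [make_pattern_eq, make_pattern_alt_eq]
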